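-- pv_equiv track=rewrite | github.com/pypi-data/pypi-mirror-57 | packages/mvpoly/mvpoly-0.97.9.tar.gz/mvpoly-0.97.9/mvpoly/util/common.py | monomial_indices
-- ===== SOURCE A (Python) =====
-- def monomial_indices(n, k):
--     """
--     A generator which yields tuples of exponents of *n*-variate
--     monomials up to order *k*.
--     """
--     def mono_ind_next(n, L, k):
--         j = next((i + 1 for i, x in enumerate(L[1:]) if x != 0), 0)
--         if j == 0:
--             if L[0] == k:
--                 return None
--             t = L[0]
--             L[0] = 0
--             L[-1] = t + 1
--         elif j < n - 1:
--             L[j] -= 1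
--             t = L[0] + 1
--             L[0] = 0
--             L[j - 1] += t
--         else:
--             t = L[0]
--             L[0] = 0
--             L[j - 1] = t + 1
--             L[j] -= 1
--         return L
--
--     if n < 1:
--         msg = 'must have at least 1 variable ({0:d} given)'.format(n)
--         raise ValueError(msg)
--     if k < 0:
--         msg = 'order cannot be negative ({0:d} given)'.format(k)
--         raise ValueError(msg)
--     L = [0] * n
--     while L:
--         yield tuple(reversed(L))
--         L = mono_ind_next(n, L, k)
-- ===== SOURCE B (Python) =====
-- def monomial_indices(n, k):
--     """
--     A generator which yields tuples of exponents of *n*-variate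
--     monomials up to order *k*.
--     """
--     if n < 1:
--         msg = 'must have at least 1 variable ({0:d} given)'.format(n)
--         raise ValueError(msg)
--     if k < 0:
--         msg = 'order cannot be negative ({0:d} given)'.format(k)
--         raise ValueError(msg)
--
--     def parts(m, d):
--         # all length-m exponent tuples of total degree d,
--         # first coordinate descending from d to 0
--         if m == 1:
--             yield (d,)
--         else:
--             for first in range(d, -1, -1):
--                 for rest in parts(m - 1, d - first):
--                     yield (first,) + rest
--
--     for d in range(k + 1):
--         yield from parts(n, d)
-- ===== Notes on version B (the rewrite author's own statement) =====
-- stated objective: simpler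
-- what changed: Replaces the stateful incremental successor function mono_ind_next (which mutates a reversed exponent list step by step) with a direct degree-grouped recursive enumeration: for each total degree d from 0 to k, recursively pick the first coordinate from d down to 0 and enumerate the remaining n-1 coordinates over the leftover budget.
import Mathlib
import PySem

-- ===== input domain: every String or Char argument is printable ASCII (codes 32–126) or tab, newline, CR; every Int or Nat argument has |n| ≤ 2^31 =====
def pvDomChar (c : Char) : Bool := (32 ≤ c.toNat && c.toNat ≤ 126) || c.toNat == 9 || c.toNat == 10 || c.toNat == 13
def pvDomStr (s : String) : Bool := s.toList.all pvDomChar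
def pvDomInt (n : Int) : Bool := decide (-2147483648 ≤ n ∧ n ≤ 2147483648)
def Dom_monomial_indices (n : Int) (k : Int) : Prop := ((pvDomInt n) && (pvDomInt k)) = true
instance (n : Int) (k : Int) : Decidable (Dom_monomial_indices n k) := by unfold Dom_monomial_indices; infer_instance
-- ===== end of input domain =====

-- B replaces A's stateful incremental successor function with a direct
-- degree-grouped recursive enumeration (objective: simpler); return values
-- are proved equal on Pre_ (n ≥ 1, k ≥ 0; elsewhere both Pythons raise the
-- same ValueError).  The Python originals are generators; equality is about
-- the materialised sequence of yielded tuples.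

-- ===== PORT A =====

-- j = next((i + 1 for i, x in enumerate(L[1:]) if x != 0), 0)
def pvFirstNonzeroIdx (L : List Int) : Nat :=
  match (L.drop 1).findIdx? (fun x => x != 0) with
  | some i => i + 1
  | none => 0

-- Transliteration of A's inner `mono_ind_next`.  In every reachable call L has
-- length n ≥ 1 and the indices 0, j-1, j, L.length-1 are in range, so
-- `getD`/`set` are exactly Python's `L[i]` / `L[i] = v` there (and `L[-1]` on a
-- nonempty list is index L.length - 1); A never indexes out of range.
def monoIndNext (n : Int) (L : List Int) (k : Int) : Option (List Int) :=
  let j : Nat := pvFirstNonzeroIdx L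
  if j = 0 then
    if L.getD 0 0 = k then none
    else
      let t := L.getD 0 0
      let L1 := L.set 0 0
      some (L1.set (L1.length - 1) (t + 1))
  else if Int.ofNat j < n - 1 then
    let L1 := L.set j (L.getD j 0 - 1)
    let t := L1.getD 0 0 + 1
    let L2 := L1.set 0 0
    some (L2.set (j - 1) (L2.getD (j - 1) 0 + t))
  else
    let t := L.getD 0 0
    let L1 := L.set 0 0
    let L2 := L1.set (j - 1) (t + 1)
    some (L2.set j (L2.getD j 0 - 1))

-- the `while L:` loop: yield tuple(reversed(L)), then L = mono_ind_next(n, L, k);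
-- the loop stops when mono_ind_next returns None; `fuel` only bounds the number
-- of iterations (pvBinom (n+k) k iterations always suffice — proved below).
def pvLoopA (n k : Int) : Nat → List Int → List (List Int)
  | 0, _ => []
  | fuel + 1, L =>
    L.reverse ::
      (match monoIndNext n L k with
       | none => []
       | some L' => pvLoopA n k fuel L')

-- C(N,K) by the multiplicative formula (exact at every step): the fuel bound.
def pvBinom (N K : Nat) : Nat :=
  (List.range (min K (N - K))).foldl (fun acc i => acc * (N - i) / (i + 1)) 1

def monomial_indices (n : Int) (k : Int) : List (List Int) :=
  if n < 1 then []        -- Python raises ValueError here (outside Pre_)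
  else if k < 0 then []   -- Python raises ValueError here (outside Pre_)
  else pvLoopA n k (pvBinom (n.toNat + k.toNat) k.toNat) (List.replicate n.toNat 0)

-- ===== PORT B =====

-- `parts(m, d)`: all length-m exponent tuples of total degree d, first
-- coordinate descending (range(d, -1, -1) = [d, d-1, …, 0] exactly).
def pvParts : Nat → Nat → List (List Int)
  | 0, _ => []        -- never reached: B only calls parts with m ≥ 1
  | 1, d => [[(d : Int)]]
  | m + 2, d =>
    ((List.range (d + 1)).reverse).flatMap
      (fun first => (pvParts (m + 1) (d - first)).map (fun rest => (first : Int) :: rest))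

def monomial_indices_alt (n : Int) (k : Int) : List (List Int) :=
  if n < 1 then []        -- Python raises ValueError here (outside Pre_)
  else if k < 0 then []   -- Python raises ValueError here (outside Pre_)
  else (List.range (k.toNat + 1)).flatMap (fun d => pvParts n.toNat d)

-- ===== PRECONDITION & SPEC =====

-- Exactly the inputs on which the Python A returns normally: on n < 1 or
-- k < 0 both A and B raise ValueError (with identical messages).
def Pre_monomial_indices (n : Int) (k : Int) : Prop := 1 ≤ n ∧ 0 ≤ k
instance (n : Int) (k : Int) : Decidable (Pre_monomial_indices n k) := by unfold Pre_monomial_indices; infer_instance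

def pvWitness_monomial_indices : Int × Int := (2, 2)

def Spec_monomial_indices (n : Int) (k : Int) (out : List (List Int)) : Prop := out = monomial_indices_alt n k
instance (n : Int) (k : Int) (out : List (List Int)) : Decidable (Spec_monomial_indices n k out) := by unfold Spec_monomial_indices; infer_instance

-- ===== CLAIM (what is proved, stated in full; the proofs are below) =====
def Claim_equal_monomial_indices : Prop := ∀ (n : Int) (k : Int), Dom_monomial_indices n k → Pre_monomial_indices n k → Spec_monomial_indices n k (monomial_indices n k)

-- ===== LEMMAS AND PROOFS =====

-- ---- small list facts about blocks of zeros ----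

lemma pv_find_zeros (a : Nat) :
    (List.replicate a (0:Int)).findIdx? (fun x => x != 0) = none := by
  induction a with
  | zero => simp
  | succ a ih => simp [List.replicate_succ, List.findIdx?_cons, ih]

lemma pv_find_znz (a : Nat) (m : Int) (rest : List Int) (hm : m ≠ 0) :
    (List.replicate a (0:Int) ++ m :: rest).findIdx? (fun x => x != 0) = some a := by
  induction a with
  | zero => simp [List.findIdx?_cons, hm]
  | succ a ih => simp [List.replicate_succ, List.findIdx?_cons, ih]

lemma pv_zset (a : Nat) (v x : Int) (xs : List Int) :
    (List.replicate a (0:Int) ++ x :: xs).set a v = List.replicate a (0:Int) ++ v :: xs := by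
  induction a with
  | zero => simp
  | succ a ih => simp [List.replicate_succ, ih]

lemma pv_zget (a : Nat) (x : Int) (xs : List Int) :
    (List.replicate a (0:Int) ++ x :: xs).getD a 0 = x := by
  induction a with
  | zero => simp
  | succ a ih => simp [List.replicate_succ]

lemma pv_zset2 (a : Nat) (v y x : Int) (xs : List Int) :
    (List.replicate a (0:Int) ++ y :: x :: xs).set (a+1) v
      = List.replicate a (0:Int) ++ y :: v :: xs := by
  induction a with
  | zero => simp
  | succ a ih => simp [List.replicate_succ]

lemma pv_zget2 (a : Nat) (y x : Int) (xs : List Int) :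
    (List.replicate a (0:Int) ++ y :: x :: xs).getD (a+1) 0 = x := by
  induction a with
  | zero => simp
  | succ a ih => simp [List.replicate_succ]

-- ---- the two shapes mono_ind_next is ever applied to ----
lemma pv_zcons (a : Nat) (xs : List Int) :
    (0:Int) :: (List.replicate a (0:Int) ++ xs) = List.replicate a (0:Int) ++ (0:Int) :: xs := by
  rw [← List.cons_append, ← List.replicate_succ, List.replicate_succ']; simp

lemma pv_step_mid (N k c m : Int) (a : Nat) (rest : List Int) (hm : m ≠ 0) :
    monoIndNext N (c :: (List.replicate a (0:Int) ++ m :: rest)) k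
      = some (List.replicate a (0:Int) ++ (c+1) :: (m-1) :: rest) := by
  have hj : pvFirstNonzeroIdx (c :: (List.replicate a (0:Int) ++ m :: rest)) = a + 1 := by
    simp [pvFirstNonzeroIdx, pv_find_znz a m rest hm]
  unfold monoIndNext
  rw [hj]
  simp only [Nat.succ_ne_zero, if_false, Nat.add_sub_cancel]
  split
  · -- elif branch
    simp only [List.set_cons_succ, List.getD_cons_succ, List.getD_cons_zero, List.set_cons_zero,
      pv_zset, pv_zget]
    rw [pv_zcons, pv_zget, pv_zset]
    ring_nf
  · -- else branch
    simp only [List.getD_cons_zero, List.set_cons_zero]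
    rw [pv_zcons, pv_zset, pv_zget2, pv_zset2]

lemma pv_step_last (N k c : Int) (a : Nat) :
    monoIndNext N (c :: List.replicate a (0:Int)) k
      = if c = k then none else some (List.replicate a (0:Int) ++ [c+1]) := by
  have hj : pvFirstNonzeroIdx (c :: List.replicate a (0:Int)) = 0 := by
    simp [pvFirstNonzeroIdx, pv_find_zeros a]
  unfold monoIndNext
  rw [hj]
  simp only [if_true, List.getD_cons_zero, List.set_cons_zero]
  split
  · rfl
  · have h0 : (0:Int) :: List.replicate a (0:Int) = List.replicate a (0:Int) ++ [(0:Int)] := by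
      simpa using pv_zcons a []
    rw [h0, List.length_append]
    simp only [List.length_replicate, List.length_cons, List.length_nil]
    rw [show a + 1 - 1 = a by omega, pv_zset]

lemma pv_chain_flatMap {α β : Type} (R : β → β → Prop) (f : α → List β) :
    ∀ (l : List α), (∀ a ∈ l, f a ≠ []) → (∀ a ∈ l, List.IsChain R (f a)) →
    List.IsChain (fun a b => ∀ x y, (f a).getLast? = some x → (f b).head? = some y → R x y) l →
    List.IsChain R (l.flatMap f)
  | [], _, _, _ => by simp
  | [a], _, hch, _ => by simpa using hch a (by simp)
  | a :: b :: t, hne, hch, hlink => by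
    rw [List.flatMap_cons, List.isChain_append]
    refine ⟨hch a (by simp), ?_, ?_⟩
    · exact pv_chain_flatMap R f (b :: t) (fun x hx => hne x (List.mem_cons_of_mem _ hx))
        (fun x hx => hch x (List.mem_cons_of_mem _ hx)) (List.isChain_cons_cons.mp hlink).2
    · intro x hx y hy
      have hb : f b ≠ [] := hne b (by simp)
      rw [List.flatMap_cons, List.head?_append_of_ne_nil _ hb] at hy
      exact (List.isChain_cons_cons.mp hlink).1 x y hx hy

lemma pv_range_chain (d : Nat) :
    List.IsChain (fun a b => b = a + 1 ∧ b ≤ d) (List.range (d+1)) := by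
  induction d with
  | zero => simp [List.range_succ]
  | succ d ih =>
    rw [List.range_succ]
    refine List.isChain_append.mpr ⟨ih.imp ?_, by simp, ?_⟩
    · exact fun a b h => ⟨h.1, by omega⟩
    · intro x hx y hy
      simp at hy
      subst hy
      constructor
      · simp [List.getLast?_range] at hx; omega
      · omega

lemma pv_revrange_chain (d : Nat) :
    List.IsChain (fun a b => b + 1 = a ∧ a ≤ d) ((List.range (d+1)).reverse) := by
  rw [List.isChain_reverse]
  exact (pv_range_chain d).imp (fun a b h => ⟨h.1.symm, h.2⟩)

lemma pv_range_rev (d : Nat) :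
    (List.range (d+1)).reverse = d :: (List.range d).reverse := by
  simp [List.range_succ]


lemma pvParts_eq (m d : Nat) :
    pvParts (m+2) d = ((List.range (d + 1)).reverse).flatMap
      (fun first => (pvParts (m + 1) (d - first)).map (fun rest => (first : Int) :: rest)) := by
  rfl

lemma pv_parts_ne (m : Nat) : ∀ (d : Nat), pvParts (m+1) d ≠ [] := by
  induction m with
  | zero => intro d; simp [pvParts]
  | succ m ih =>
    intro d
    show pvParts (m+2) d ≠ []
    rw [pvParts_eq, pv_range_rev, List.flatMap_cons]
    intro h
    rcases List.append_eq_nil_iff.mp h with ⟨h1, -⟩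
    exact ih (d - d) (List.map_eq_nil_iff.mp h1)

lemma pv_parts_head (m : Nat) : ∀ (d : Nat),
    (pvParts (m+1) d).head? = some ((d:Int) :: List.replicate m (0:Int)) := by
  induction m with
  | zero => intro d; simp [pvParts]
  | succ m ih =>
    intro d
    show (pvParts (m+2) d).head? = _
    rw [pvParts_eq, pv_range_rev, List.flatMap_cons,
      List.head?_append_of_ne_nil, List.head?_map, ih (d - d)]
    · simp [List.replicate_succ]
    · intro h; exact pv_parts_ne m (d - d) (List.map_eq_nil_iff.mp h)

lemma pv_parts_last (m : Nat) : ∀ (d : Nat),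
    (pvParts (m+1) d).getLast? = some (List.replicate m (0:Int) ++ [(d:Int)]) := by
  induction m with
  | zero => intro d; simp [pvParts]
  | succ m ih =>
    intro d
    show (pvParts (m+2) d).getLast? = _
    rw [pvParts_eq]
    rw [show (List.range (d+1)).reverse
          = (List.map Nat.succ (List.range d)).reverse ++ [0] from by
        rw [List.range_succ_eq_map]; simp]
    rw [List.flatMap_append, List.flatMap_cons, List.flatMap_nil, List.append_nil,
      List.getLast?_append_of_ne_nil, List.getLast?_map]
    · simp [ih d, List.replicate_succ]
    · intro h; exact pv_parts_ne m (d - 0) (List.map_eq_nil_iff.mp h)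

lemma pv_chainC (N k : Int) (m : Nat) : ∀ (d : Nat) (suffix : List Int),
    List.IsChain (fun t t' => monoIndNext N (t.reverse ++ suffix) k
      = some (t'.reverse ++ suffix)) (pvParts (m+1) d) := by
  induction m with
  | zero => intro d suffix; simp [pvParts]
  | succ m ih =>
    intro d suffix
    rw [pvParts_eq]
    apply pv_chain_flatMap
    · intro a _ h
      exact pv_parts_ne m (d - a) (List.map_eq_nil_iff.mp h)
    · intro a _
      rw [List.isChain_map]
      refine (ih (d - a) ((a:Int) :: suffix)).imp ?_
      intro t t' h
      simpa [List.append_assoc] using h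
    · refine (pv_revrange_chain d).imp ?_
      rintro a b ⟨hba, had⟩ x y hx hy
      rw [List.getLast?_map, pv_parts_last] at hx
      rw [List.head?_map, pv_parts_head] at hy
      simp only [Option.map_some, Option.some.injEq] at hx hy
      subst hx hy
      have hx' : ((a:Int) :: (List.replicate m (0:Int) ++ [((d-a : Nat):Int)])).reverse ++ suffix
          = ((d-a : Nat):Int) :: (List.replicate m (0:Int) ++ ((a:Int) :: suffix)) := by
        simp
      have hy' : (((b:Nat):Int) :: ((((d-b) : Nat):Int) :: List.replicate m (0:Int))).reverse ++ suffix
          = List.replicate m (0:Int) ++ ((((d-b):Nat):Int) :: ((b:Int) :: suffix)) := by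
        simp
      rw [hx', hy', pv_step_mid N k _ _ m suffix (by omega : ((a:Nat):Int) ≠ 0)]
      have e1 : ((((d-a):Nat)):Int) + 1 = (((d-b):Nat):Int) := by omega
      have e2 : ((a:Nat):Int) - 1 = ((b:Nat):Int) := by omega
      rw [e1, e2]

lemma pv_chain_out (N k : Int) (m kN : Nat) (hk : k = (kN : Int)) :
    List.IsChain (fun t t' => monoIndNext N t.reverse k = some t'.reverse)
      ((List.range (kN+1)).flatMap (fun d => pvParts (m+1) d)) := by
  apply pv_chain_flatMap
  · intro d _
    exact pv_parts_ne m d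
  · intro d _
    refine (pv_chainC N k m d []).imp ?_
    intro t t' h
    simpa using h
  · refine (pv_range_chain kN).imp ?_
    rintro a b ⟨hab, hbk⟩ x y hx hy
    rw [pv_parts_last] at hx
    rw [pv_parts_head] at hy
    simp only [Option.some.injEq] at hx hy
    subst hx hy
    have hx' : (List.replicate m (0:Int) ++ [((a:Nat):Int)]).reverse
        = ((a:Nat):Int) :: List.replicate m (0:Int) := by simp
    rw [hx', pv_step_last N k _ m, if_neg (by omega : ¬ ((a:Nat):Int) = k)]
    have : ((a:Nat):Int) + 1 = ((b:Nat):Int) := by omega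
    rw [this]
    simp

lemma pv_out_head (m kN : Nat) :
    ((List.range (kN+1)).flatMap (fun d => pvParts (m+1) d)).head?
      = some (List.replicate (m+1) (0:Int)) := by
  rw [show List.range (kN+1) = 0 :: List.map Nat.succ (List.range kN) from by
        rw [List.range_succ_eq_map]]
  rw [List.flatMap_cons, List.head?_append_of_ne_nil _ (pv_parts_ne m 0), pv_parts_head]
  simp [List.replicate_succ]

lemma pv_out_last (m kN : Nat) :
    ((List.range (kN+1)).flatMap (fun d => pvParts (m+1) d)).getLast?
      = some (List.replicate m (0:Int) ++ [(kN:Int)]) := by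
  rw [List.range_succ, List.flatMap_append, List.flatMap_cons, List.flatMap_nil,
    List.append_nil, List.getLast?_append_of_ne_nil _ (pv_parts_ne m kN), pv_parts_last]

lemma pv_loop_run (N K : Int) :
    ∀ (Ls : List (List Int)) (L : List Int) (fuel : Nat),
    Ls.length < fuel →
    List.IsChain (fun x y => monoIndNext N x K = some y) (L :: Ls) →
    (∀ x, (L :: Ls).getLast? = some x → monoIndNext N x K = none) →
    pvLoopA N K fuel L = (L :: Ls).map List.reverse := by
  intro Ls
  induction Ls with
  | nil =>
    intro L fuel hf _ hlast
    obtain ⟨fuel, rfl⟩ : ∃ f, fuel = f + 1 := ⟨fuel - 1, by omega⟩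
    show pvLoopA N K (fuel+1) L = [L.reverse]
    rw [pvLoopA, hlast L (by simp)]
  | cons L' Ls ih =>
    intro L fuel hf hch hlast
    obtain ⟨fuel, rfl⟩ : ∃ f, fuel = f + 1 := ⟨fuel - 1, by omega⟩
    show pvLoopA N K (fuel+1) L = L.reverse :: (L' :: Ls).map List.reverse
    rw [pvLoopA, (List.isChain_cons_cons.mp hch).1, List.map_cons]
    show L.reverse :: pvLoopA N K fuel L' = _
    rw [ih L' fuel (by simpa using hf) (List.isChain_cons_cons.mp hch).2
      (fun x hx => hlast x (by rw [List.getLast?_cons_cons]; exact hx))]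
    simp

lemma pv_sum_reflect : ∀ (d : Nat) (g : Nat → Nat),
    ((List.range (d+1)).map (fun f => g (d - f))).sum
      = ((List.range (d+1)).map g).sum := by
  intro d
  induction d with
  | zero => intro g; simp
  | succ d ih =>
    intro g
    rw [List.range_succ, List.map_append, List.sum_append]
    have h1 : (List.range (d+1)).map (fun f => g (d + 1 - f))
        = (List.range (d+1)).map (fun f => (fun e => g (e + 1)) (d - f)) := by
      apply List.map_congr_left
      intro f hf
      simp only []
      congr 1
      simp [List.mem_range] at hf
      omega
    rw [h1, ih (fun e => g (e + 1))]
    have h2 : ((List.range (d+1+1)).map g).sum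
        = g 0 + ((List.range (d+1)).map (fun e => g (e+1))).sum := by
      rw [List.range_succ_eq_map]
      simp [List.map_map, Function.comp_def, Nat.succ_eq_add_one]
    rw [← List.range_succ, h2]
    simp
    omega

lemma pv_hockey (m : Nat) : ∀ (d : Nat),
    ((List.range (d+1)).map (fun e => (m + e).choose e)).sum = (m + 1 + d).choose d := by
  intro d
  induction d with
  | zero => simp
  | succ d ih =>
    rw [List.range_succ, List.map_append, List.sum_append, ih]
    simp only [List.map_cons, List.map_nil, List.sum_cons, List.sum_nil, Nat.add_zero]
    rw [show m + 1 + (d + 1) = (m + 1 + d) + 1 from by omega,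
      show m + (d + 1) = m + 1 + d from by omega,
      Nat.choose_succ_succ]

lemma pv_len_parts (m : Nat) : ∀ (d : Nat),
    (pvParts (m+1) d).length = (m + d).choose d := by
  induction m with
  | zero => intro d; simp [pvParts]
  | succ m ih =>
    intro d
    rw [pvParts_eq, List.length_flatMap]
    simp only [List.length_map]
    rw [List.map_reverse, List.sum_reverse]
    have h1 : (List.range (d+1)).map (fun f => (pvParts (m+1) (d - f)).length)
        = (List.range (d+1)).map (fun f => (fun e => (m + e).choose e) (d - f)) := by
      apply List.map_congr_left
      intro f _
      exact ih (d - f)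
    rw [h1, pv_sum_reflect d (fun e => (m + e).choose e), pv_hockey m d]

lemma pv_len_out (m kN : Nat) :
    ((List.range (kN+1)).flatMap (fun d => pvParts (m+1) d)).length
      = (m + 1 + kN).choose kN := by
  rw [List.length_flatMap]
  have h1 : (List.range (kN+1)).map (fun d => (pvParts (m+1) d).length)
      = (List.range (kN+1)).map (fun e => (m + e).choose e) := by
    apply List.map_congr_left
    intro d _
    exact pv_len_parts m d
  rw [h1, pv_hockey m kN]

lemma pv_binom_foldl (N : Nat) : ∀ (j : Nat), j ≤ N →
    (List.range j).foldl (fun acc i => acc * (N - i) / (i + 1)) 1 = N.choose j := by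
  intro j
  induction j with
  | zero => simp
  | succ j ih =>
    intro hj
    rw [List.range_succ, List.foldl_append, ih (by omega)]
    simp only [List.foldl_cons, List.foldl_nil]
    rw [show N.choose j * (N - j) = N.choose (j+1) * (j+1) from (Nat.choose_succ_right_eq N j).symm,
      Nat.mul_div_cancel _ (by omega)]

lemma pv_binom_eq (N K : Nat) (h : K ≤ N) : pvBinom N K = N.choose K := by
  unfold pvBinom
  rcases le_total K (N - K) with hle | hle
  · rw [min_eq_left hle, pv_binom_foldl N K h]
  · rw [min_eq_right hle, pv_binom_foldl N (N - K) (by omega)]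
    rw [Nat.choose_symm h]

-- ===== VERDICT (by name: the statement is the Claim_ definition above) =====
theorem monomial_indices_spec : Claim_equal_monomial_indices := by
  rintro n k - ⟨hn, hk⟩
  unfold Spec_monomial_indices monomial_indices monomial_indices_alt
  rw [if_neg (by omega), if_neg (by omega), if_neg (by omega), if_neg (by omega)]
  obtain ⟨m, hm⟩ : ∃ m, n.toNat = m + 1 := ⟨n.toNat - 1, by omega⟩
  have hkcast : k = (k.toNat : Int) := by omega
  set kN := k.toNat with hkN
  set outL := (List.range (kN+1)).flatMap (fun d => pvParts (m+1) d) with houtL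
  have hhead : outL.head? = some (List.replicate (m+1) (0:Int)) := by
    rw [houtL]; exact pv_out_head m kN
  obtain ⟨tl, htl⟩ : ∃ tl, outL = List.replicate (m+1) (0:Int) :: tl := by
    cases houtL' : outL with
    | nil => rw [houtL'] at hhead; simp at hhead
    | cons h t =>
      rw [houtL'] at hhead
      simp only [List.head?_cons, Option.some.injEq] at hhead
      exact ⟨t, by rw [hhead]⟩
  have hstates : outL.map List.reverse = List.replicate (m+1) (0:Int) :: tl.map List.reverse := by
    rw [htl]; simp
  have hfuel : pvBinom (n.toNat + kN) kN = outL.length := by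
    rw [hm, pv_binom_eq (m + 1 + kN) kN (by omega), houtL, pv_len_out m kN]
  have hlen : (tl.map List.reverse).length < pvBinom (n.toNat + kN) kN := by
    rw [hfuel, htl]; simp
  have hchain : List.IsChain (fun x y => monoIndNext n x k = some y)
      (List.replicate (m+1) (0:Int) :: tl.map List.reverse) := by
    rw [← hstates, List.isChain_map]
    exact pv_chain_out n k m kN hkcast
  have hlast : ∀ x, (List.replicate (m+1) (0:Int) :: tl.map List.reverse).getLast? = some x →
      monoIndNext n x k = none := by
    intro x hx
    rw [← hstates, List.getLast?_map, pv_out_last m kN] at hx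
    simp only [Option.map_some, Option.some.injEq] at hx
    subst hx
    rw [show (List.replicate m (0:Int) ++ [(kN:Int)]).reverse
        = (kN:Int) :: List.replicate m (0:Int) from by simp]
    rw [pv_step_last n k _ m, if_pos hkcast.symm]
  rw [hm] at hlen ⊢
  rw [pv_loop_run n k (tl.map List.reverse) (List.replicate (m+1) (0:Int)) _ hlen hchain hlast]
  rw [← hstates, List.map_map]
  simp
  exact houtL
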